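-- pv_equiv track=rewrite | github.com/kubamarchut/best-net-stenography-project | decoder.py | get_whitespace_between_words
-- ===== SOURCE A (Python) =====
-- def get_whitespace_between_words(text):
--     # Initialize a list to hold the whitespace segments
--     whitespace_segments = []
--
--     # Split the text into words
--     words = text.split()
--
--     # Initialize the start index for the first word
--     start_index = 0
--
--     # Iterate through the words to find the whitespace between them
--     for word in words:
--         # Find the index of the current word in the original text
--         word_index = text.find(word, start_index)
--
--         # If this is not the first word, get the whitespace before it
--         if start_index != 0:
--             whitespace = text[start_index:word_index]
--             whitespace_segments.append(whitespace)
--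
--         # Update the start index for the next iteration
--         start_index = word_index + len(word)
--
--     return whitespace_segments
-- ===== SOURCE B (Python) =====
-- def get_whitespace_between_words(text):
--     # Single-pass state machine: buffer whitespace runs after the first word,
--     # flush the buffer when the next word starts.
--     segments = []
--     pending = []
--     seen_word = False
--     for ch in text:
--         if ch.isspace():
--             if seen_word:
--                 pending.append(ch)
--         else:
--             if pending:
--                 segments.append(''.join(pending))
--                 pending = []
--             seen_word = True
--     return segments
-- ===== Notes on version B (the rewrite author's own statement) =====
-- stated objective: alternative
-- what changed: Replaces A's split()+find() index bookkeeping with a single linear scan over the characters: a small state machine buffers whitespace runs after the first word and flushes the buffer when the next word starts.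
import Mathlib
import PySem

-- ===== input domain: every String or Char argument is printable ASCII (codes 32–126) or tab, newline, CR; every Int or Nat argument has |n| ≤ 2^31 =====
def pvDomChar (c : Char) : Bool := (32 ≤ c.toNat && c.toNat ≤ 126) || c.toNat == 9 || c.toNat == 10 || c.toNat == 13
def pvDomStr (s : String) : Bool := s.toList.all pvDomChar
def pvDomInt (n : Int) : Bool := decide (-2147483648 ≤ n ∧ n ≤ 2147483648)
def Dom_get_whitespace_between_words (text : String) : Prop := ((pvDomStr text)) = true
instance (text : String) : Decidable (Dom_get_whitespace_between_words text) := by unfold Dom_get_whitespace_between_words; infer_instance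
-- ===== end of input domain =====

-- B replaces A's split()+find() index bookkeeping by a single-pass state machine over the
-- characters (an alternative decomposition, same cost); return values proved equal on all inputs.

-- ===== PORT A =====
def get_whitespace_between_words (text : String) : List String :=
  let words := PySem.Str.split₀ text
  (words.foldl (fun (st : List String × Int) (word : String) =>
      let word_index := PySem.Str.findFrom text word st.2
      ((if st.2 ≠ 0 then st.1 ++ [PySem.Str.slice text (some st.2) (some word_index)] else st.1),
        word_index + PySem.Str.len word)) (([], 0) : List String × Int)).1

-- ===== PORT B =====
-- one step of B's state machine: state = (segments, pending whitespace buffer, seen_word)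
def pvAltStep (st : List String × List Char × Bool) (c : Char) : List String × List Char × Bool :=
  if PySem.Chars.isspace c then
    (st.1, (if st.2.2 then st.2.1 ++ [c] else st.2.1), st.2.2)
  else
    ((if st.2.1.isEmpty then st.1 else st.1 ++ [String.ofList st.2.1]), [], true)

def get_whitespace_between_words_alt (text : String) : List String :=
  (text.toList.foldl pvAltStep ([], [], false)).1

-- ===== PRECONDITION & SPEC =====
def Spec_get_whitespace_between_words (text : String) (out : List String) : Prop := out = get_whitespace_between_words_alt text
instance (text : String) (out : List String) : Decidable (Spec_get_whitespace_between_words text out) := by unfold Spec_get_whitespace_between_words; infer_instance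

-- ===== CLAIM (what is proved, stated in full; the proofs are below) =====
def Claim_equal_get_whitespace_between_words : Prop := ∀ (text : String), Dom_get_whitespace_between_words text → Spec_get_whitespace_between_words text (get_whitespace_between_words text)

-- ===== LEMMAS AND PROOFS =====

theorem pvGo_nil (cur acc) : PySem.Chars.split₀.go [] cur acc = if cur.isEmpty then acc.reverse else (cur.reverse :: acc).reverse := by
  rw [PySem.Chars.split₀.go]
theorem pvGo_cons (c : Char) (cs cur acc) : PySem.Chars.split₀.go (c :: cs) cur acc =
    if PySem.Chars.isspace c then (if cur.isEmpty then PySem.Chars.split₀.go cs [] acc else PySem.Chars.split₀.go cs [] (cur.reverse :: acc)) else PySem.Chars.split₀.go cs (c :: cur) acc := by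
  rw [PySem.Chars.split₀.go]

theorem pvGo_acc (cs : List Char) : ∀ cur acc, PySem.Chars.split₀.go cs cur acc = acc.reverse ++ PySem.Chars.split₀.go cs cur [] := by
  induction cs with
  | nil =>
    intro cur acc
    by_cases h : cur.isEmpty <;> simp [pvGo_nil, h]
  | cons c rest ih =>
    intro cur acc
    by_cases hs : PySem.Chars.isspace c
    · by_cases hc : cur.isEmpty
      · simp only [pvGo_cons, hs, hc, if_true]
        exact ih [] acc
      · simp only [pvGo_cons, hs, hc, if_true]
        rw [ih [] (cur.reverse :: acc), ih [] [cur.reverse]]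
        simp
    · simp only [pvGo_cons, hs]
      exact ih (c :: cur) acc

theorem pvGo_ws (ws : List Char) (hws : ∀ c ∈ ws, PySem.Chars.isspace c = true) (x : List Char) (acc : List (List Char)) :
    PySem.Chars.split₀.go (ws ++ x) [] acc = PySem.Chars.split₀.go x [] acc := by
  induction ws with
  | nil => simp
  | cons c rest ih =>
    have hc := hws c (by simp)
    rw [List.cons_append, pvGo_cons]
    simp only [hc, if_true, List.isEmpty_nil]
    exact ih (fun d hd => hws d (by simp [hd]))

theorem pvGo_word (w : List Char) (hw : ∀ c ∈ w, PySem.Chars.isspace c = false) (x : List Char) :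
    ∀ cur acc, PySem.Chars.split₀.go (w ++ x) cur acc = PySem.Chars.split₀.go x (w.reverse ++ cur) acc := by
  induction w with
  | nil => simp
  | cons c rest ih =>
    intro cur acc
    have hc := hw c (by simp)
    rw [List.cons_append, pvGo_cons, hc]
    simp only [Bool.false_eq_true, if_false]
    rw [ih (fun d hd => hw d (by simp [hd])) (c :: cur) acc]
    simp


def pvNonWs (c : Char) : Bool := !PySem.Chars.isspace c

theorem pvSplit₀_nil (r : List Char) (h : r.dropWhile PySem.Chars.isspace = []) :
    PySem.Chars.split₀ r = [] := by
  have hall : ∀ c ∈ r, PySem.Chars.isspace c = true := by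
    rw [← List.dropWhile_eq_nil_iff]; exact h
  show PySem.Chars.split₀.go r [] [] = []
  have := pvGo_ws r hall [] []
  simpa using this

theorem pvSplit₀_decomp (ws w r' : List Char)
    (hws : ∀ c ∈ ws, PySem.Chars.isspace c = true)
    (hw : ∀ c ∈ w, PySem.Chars.isspace c = false) (hwne : w ≠ [])
    (hr' : r' = [] ∨ ∃ d x, r' = d :: x ∧ PySem.Chars.isspace d = true) :
    PySem.Chars.split₀ (ws ++ w ++ r') = w :: PySem.Chars.split₀ r' := by
  show PySem.Chars.split₀.go (ws ++ w ++ r') [] [] = _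
  rw [List.append_assoc, pvGo_ws _ hws, pvGo_word w hw _ [] []]
  rcases hr' with rfl | ⟨d, x, rfl, hd⟩
  · rw [pvGo_nil]
    simp [List.isEmpty_iff, hwne]
    rfl
  · rw [pvGo_cons]
    simp only [hd, if_true, List.append_nil, List.isEmpty_iff, List.reverse_eq_nil_iff]
    rw [if_neg hwne]
    simp only [List.reverse_reverse]
    rw [pvGo_acc]
    show _ = w :: PySem.Chars.split₀.go (d :: x) [] []
    rw [pvGo_cons]
    simp [hd]

theorem pvSplit₀_cons (r : List Char) (h : r.dropWhile PySem.Chars.isspace ≠ []) :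
    PySem.Chars.split₀ r =
      (r.dropWhile PySem.Chars.isspace).takeWhile pvNonWs ::
        PySem.Chars.split₀ ((r.dropWhile PySem.Chars.isspace).dropWhile pvNonWs) := by
  have hdec : r = r.takeWhile PySem.Chars.isspace
      ++ (r.dropWhile PySem.Chars.isspace).takeWhile pvNonWs
      ++ (r.dropWhile PySem.Chars.isspace).dropWhile pvNonWs := by
    rw [List.append_assoc, List.takeWhile_append_dropWhile, List.takeWhile_append_dropWhile]
  have hws : ∀ c ∈ r.takeWhile PySem.Chars.isspace, PySem.Chars.isspace c = true :=
    fun c hc => List.mem_takeWhile_imp hc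
  have hwall : ∀ c ∈ (r.dropWhile PySem.Chars.isspace).takeWhile pvNonWs, PySem.Chars.isspace c = false := by
    intro c hc
    have := List.mem_takeWhile_imp hc
    simpa [pvNonWs] using this
  have hwne : (r.dropWhile PySem.Chars.isspace).takeWhile pvNonWs ≠ [] := by
    obtain ⟨c, cs, hcc⟩ := List.exists_cons_of_ne_nil h
    have hcns : PySem.Chars.isspace c = false := by
      have := List.head_dropWhile_not PySem.Chars.isspace (l := r) h
      simp only [hcc, List.head_cons] at this
      exact this
    rw [hcc, List.takeWhile_cons]
    simp [pvNonWs, hcns]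
  have hr' : (r.dropWhile PySem.Chars.isspace).dropWhile pvNonWs = [] ∨
      ∃ d x, (r.dropWhile PySem.Chars.isspace).dropWhile pvNonWs = d :: x ∧ PySem.Chars.isspace d = true := by
    rcases he : (r.dropWhile PySem.Chars.isspace).dropWhile pvNonWs with _ | ⟨d, x⟩
    · exact Or.inl rfl
    · refine Or.inr ⟨d, x, rfl, ?_⟩
      have hne : (r.dropWhile PySem.Chars.isspace).dropWhile pvNonWs ≠ [] := by simp [he]
      have := List.head_dropWhile_not pvNonWs (l := r.dropWhile PySem.Chars.isspace) hne
      simp only [he, List.head_cons] at this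
      simpa [pvNonWs] using this
  conv_lhs => rw [hdec]
  exact pvSplit₀_decomp _ _ _ hws hwall hwne hr'

theorem pvFind_eq (s sub : List Char) (j : Nat) (h1 : sub <+: s.drop j)
    (h2 : ∀ i < j, ¬ sub <+: s.drop i) : PySem.Chars.find s sub = (j : Int) := by
  have hinf : sub <:+: s := by
    obtain ⟨t, ht⟩ := h1
    exact ⟨s.take j, t, by rw [List.append_assoc, ht, List.take_append_drop]⟩
  have h0 : 0 ≤ PySem.Chars.find s sub := (PySem.Chars.find_nonneg_iff s sub).2 hinf
  obtain ⟨hpre, hmin⟩ := PySem.Chars.find_spec h0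
  have hje : (PySem.Chars.find s sub).toNat = j := by
    rcases Nat.lt_trichotomy (PySem.Chars.find s sub).toNat j with hlt | heq | hgt
    · exact absurd hpre (h2 _ hlt)
    · exact heq
    · exact absurd h1 (hmin j hgt)
  omega

theorem pvFind_at (ws w x : List Char) (hws : ∀ c ∈ ws, PySem.Chars.isspace c = true)
    (hw : ∃ c cs, w = c :: cs ∧ PySem.Chars.isspace c = false) :
    PySem.Chars.find (ws ++ w ++ x) w = (ws.length : Int) := by
  apply pvFind_eq
  · rw [List.append_assoc, List.drop_left]
    exact List.prefix_append w x
  · intro i hi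
    obtain ⟨c, cs, rfl, hc⟩ := hw
    rw [List.append_assoc, List.drop_append_of_le_length (le_of_lt hi),
      List.drop_eq_getElem_cons hi]
    rw [List.cons_append, List.cons_prefix_cons]
    rintro ⟨rfl, -⟩
    exact absurd (hws _ (List.getElem_mem hi)) (by simp [hc])

theorem pvFindFrom_at (t ws w x : List Char) (k : Nat) (hk : k ≤ t.length)
    (hdrop : t.drop k = ws ++ w ++ x)
    (hws : ∀ c ∈ ws, PySem.Chars.isspace c = true)
    (hw : ∃ c cs, w = c :: cs ∧ PySem.Chars.isspace c = false) :
    PySem.Chars.findFrom t w (k : Int) = ((k + ws.length : Nat) : Int) := by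
  rw [PySem.Chars.findFrom_natCast t w k hk, hdrop, pvFind_at ws w x hws hw]
  have : ((ws.length : Int)) ≠ -1 := by omega
  simp only [if_neg this]
  push_cast
  ring

theorem pvDecomp (r : List Char) (h : r.dropWhile PySem.Chars.isspace ≠ []) :
    r = r.takeWhile PySem.Chars.isspace ++ (r.dropWhile PySem.Chars.isspace).takeWhile pvNonWs
        ++ (r.dropWhile PySem.Chars.isspace).dropWhile pvNonWs
    ∧ (∀ c ∈ r.takeWhile PySem.Chars.isspace, PySem.Chars.isspace c = true)
    ∧ (∀ c ∈ (r.dropWhile PySem.Chars.isspace).takeWhile pvNonWs, PySem.Chars.isspace c = false)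
    ∧ (∃ c cs, (r.dropWhile PySem.Chars.isspace).takeWhile pvNonWs = c :: cs ∧ PySem.Chars.isspace c = false)
    ∧ ((r.dropWhile PySem.Chars.isspace).dropWhile pvNonWs = [] ∨
        ∃ d x, (r.dropWhile PySem.Chars.isspace).dropWhile pvNonWs = d :: x ∧ PySem.Chars.isspace d = true) := by
  obtain ⟨c, cs, hcc⟩ := List.exists_cons_of_ne_nil h
  have hcns : PySem.Chars.isspace c = false := by
    have := List.head_dropWhile_not PySem.Chars.isspace (l := r) h
    simpa [hcc] using this
  refine ⟨?_, fun c hc => List.mem_takeWhile_imp hc, ?_, ?_, ?_⟩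
  · rw [List.append_assoc, List.takeWhile_append_dropWhile, List.takeWhile_append_dropWhile]
  · intro c hc
    have := List.mem_takeWhile_imp hc
    simpa [pvNonWs] using this
  · refine ⟨c, cs.takeWhile pvNonWs, ?_, hcns⟩
    rw [hcc, List.takeWhile_cons]
    simp [pvNonWs, hcns]
  · rcases he : (r.dropWhile PySem.Chars.isspace).dropWhile pvNonWs with _ | ⟨d, x⟩
    · exact Or.inl rfl
    · refine Or.inr ⟨d, x, rfl, ?_⟩
      have hne : (r.dropWhile PySem.Chars.isspace).dropWhile pvNonWs ≠ [] := by simp [he]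
      have := List.head_dropWhile_not pvNonWs (l := r.dropWhile PySem.Chars.isspace) hne
      simp only [he, List.head_cons] at this
      simpa [pvNonWs] using this

def pvGaps (r : List Char) : List (List Char) :=
  match h : r.dropWhile PySem.Chars.isspace with
  | [] => []
  | c :: cs =>
      r.takeWhile PySem.Chars.isspace ::
        pvGaps ((r.dropWhile PySem.Chars.isspace).dropWhile pvNonWs)
  termination_by r.length
  decreasing_by
    have h1 : (r.dropWhile PySem.Chars.isspace).length ≤ r.length := List.length_dropWhile_le _ _
    have h2 : pvNonWs c = true := by
      have := List.head_dropWhile_not PySem.Chars.isspace (l := r) (by simp [h])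
      simp [h] at this
      simp [pvNonWs, this]
    have heq : ((r.dropWhile PySem.Chars.isspace).dropWhile pvNonWs) = cs.dropWhile pvNonWs := by
      rw [h]; simp [h2]
    have h3 : (cs.dropWhile pvNonWs).length ≤ cs.length := List.length_dropWhile_le _ _
    have h4 : (c :: cs).length ≤ r.length := by rw [← h]; exact h1
    simp at h4
    rw [heq]
    omega

def pvGaps0 (r : List Char) : List (List Char) :=
  match r.dropWhile PySem.Chars.isspace with
  | [] => []
  | _ :: _ => pvGaps ((r.dropWhile PySem.Chars.isspace).dropWhile pvNonWs)

theorem pvGaps_nil (r : List Char) (h : r.dropWhile PySem.Chars.isspace = []) : pvGaps r = [] := by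
  rw [pvGaps]
  split
  · rfl
  · next c cs heq => rw [h] at heq; cases heq

theorem pvGaps_cons (r : List Char) (h : r.dropWhile PySem.Chars.isspace ≠ []) :
    pvGaps r = r.takeWhile PySem.Chars.isspace ::
      pvGaps ((r.dropWhile PySem.Chars.isspace).dropWhile pvNonWs) := by
  rw [pvGaps]
  split
  · next heq => exact absurd heq h
  · rfl

theorem pvGaps0_nil (r : List Char) (h : r.dropWhile PySem.Chars.isspace = []) : pvGaps0 r = [] := by
  rw [pvGaps0]
  split
  · rfl
  · next c cs heq => rw [h] at heq; cases heq

theorem pvGaps0_cons (r : List Char) (h : r.dropWhile PySem.Chars.isspace ≠ []) :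
    pvGaps0 r = pvGaps ((r.dropWhile PySem.Chars.isspace).dropWhile pvNonWs) := by
  rw [pvGaps0]
  split
  · next heq => exact absurd heq h
  · rfl

theorem pvFoldA (t : List Char) (n : Nat) : ∀ (r : List Char) (k : Nat) (segs : List String),
    r.length ≤ n → k ≤ t.length → t.drop k = r →
    (((PySem.Chars.split₀ r).map String.ofList).foldl (fun (st : List String × Int) (word : String) =>
        ((if st.2 ≠ 0 then st.1 ++ [PySem.Str.slice (String.ofList t) (some st.2) (some (PySem.Chars.findFrom t word.toList st.2))] else st.1),
          PySem.Chars.findFrom t word.toList st.2 + PySem.Str.len word)) (segs, (k : Int))).1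
      = segs ++ ((if k = 0 then pvGaps0 r else pvGaps r).map String.ofList) := by
  induction n with
  | zero =>
    intro r k segs hn hk hd
    have hr : r = [] := List.eq_nil_of_length_eq_zero (Nat.le_zero.mp hn)
    subst hr
    rw [pvSplit₀_nil [] rfl]
    by_cases hk0 : k = 0 <;>
      simp [hk0, pvGaps_nil [] rfl, pvGaps0_nil [] rfl]
  | succ n ih =>
    intro r k segs hn hk hd
    by_cases hrest : r.dropWhile PySem.Chars.isspace = []
    · rw [pvSplit₀_nil _ hrest]
      by_cases hk0 : k = 0 <;>
        simp [hk0, pvGaps_nil _ hrest, pvGaps0_nil _ hrest]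
    · obtain ⟨hdec, hws, hwall, hwne, hr'⟩ := pvDecomp r hrest
      set ws := r.takeWhile PySem.Chars.isspace with hwsdef
      set w := (r.dropWhile PySem.Chars.isspace).takeWhile pvNonWs with hwdef
      set r' := (r.dropWhile PySem.Chars.isspace).dropWhile pvNonWs with hr'def
      have hdrop : t.drop k = ws ++ w ++ r' := by rw [hd]; exact hdec
      have hlen : t.length - k = ws.length + (w.length + r'.length) := by
        simpa using congrArg List.length hdrop
      have hwpos : 0 < w.length := by
        obtain ⟨c, cs, hcc, -⟩ := hwne
        simp [hcc]
      have hfind : PySem.Chars.findFrom t w (k : Int) = ((k + ws.length : Nat) : Int) :=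
        pvFindFrom_at t ws w r' k hk hdrop hws hwne
      have hk' : k + ws.length + w.length ≤ t.length := by omega
      have hd' : t.drop (k + ws.length + w.length) = r' := by
        have h1 : t.drop (k + (ws.length + w.length)) = (t.drop k).drop (ws.length + w.length) := by
          rw [List.drop_drop]
        rw [← Nat.add_assoc] at h1
        rw [h1, hdrop]
        have h2 : ws.length + w.length = (ws ++ w).length := by simp
        rw [h2, List.drop_left]
      have hn' : r'.length ≤ n := by
        have hrlen : r.length = ws.length + (w.length + r'.length) := by
          simpa using congrArg List.length hdec
        omega
      rw [pvSplit₀_cons r hrest, ← hwdef, ← hr'def]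
      rw [List.map_cons, List.foldl_cons]
      simp only [String.toList_ofList]
      rw [hfind]
      have hstep2 : ((k + ws.length : Nat) : Int) + PySem.Str.len (String.ofList w)
          = ((k + ws.length + w.length : Nat) : Int) := by
        simp only [PySem.Str.len, String.toList_ofList]
        push_cast; ring
      rw [hstep2]
      have hkne' : ((k + ws.length + w.length : Nat) : Int) ≠ 0 := by
        have : k + ws.length + w.length ≠ 0 := by omega
        exact_mod_cast this
      by_cases hk0 : k = 0
      · subst hk0
        simp only [Nat.cast_zero, ne_eq, not_true_eq_false, if_false, reduceIte]
        rw [ih r' (0 + ws.length + w.length) segs hn' hk' hd']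
        have : (0 : Nat) + ws.length + w.length ≠ 0 := by omega
        rw [if_neg this, pvGaps0_cons r hrest, ← hr'def]
      · have hcast : ((k : Int)) ≠ 0 := by exact_mod_cast hk0
        simp only [hcast, ne_eq, not_false_eq_true, if_true]
        have hslice : PySem.Str.slice (String.ofList t) (some (k : Int)) (some ((k + ws.length : Nat) : Int))
            = String.ofList ws := by
          simp only [PySem.Str.slice, String.toList_ofList]
          rw [PySem.Chars.slice, PySem.List.slice_natCast t k (k + ws.length)]
          congr 1
          rw [Nat.add_sub_cancel_left, hdrop, List.append_assoc]
          exact List.take_left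
        rw [hslice]
        rw [ih r' (k + ws.length + w.length) (segs ++ [String.ofList ws]) hn' hk' hd']
        have : k + ws.length + w.length ≠ 0 := by omega
        rw [if_neg this, pvGaps_cons r hrest, ← hwsdef, ← hr'def, if_neg hk0]
        simp

theorem pvFoldB_ws (ws : List Char) (hws : ∀ c ∈ ws, PySem.Chars.isspace c = true) :
    ∀ (x : List Char) (segs : List String) (p : List Char),
    (ws ++ x).foldl pvAltStep (segs, p, true) = x.foldl pvAltStep (segs, p ++ ws, true) := by
  induction ws with
  | nil => intro x segs p; simp
  | cons c rest ih =>
    intro x segs p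
    have hc := hws c (by simp)
    rw [List.cons_append, List.foldl_cons]
    show (rest ++ x).foldl pvAltStep (pvAltStep (segs, p, true) c) = _
    rw [show pvAltStep (segs, p, true) c = (segs, p ++ [c], true) by simp [pvAltStep, hc]]
    rw [ih (fun d hd => hws d (by simp [hd])) x segs (p ++ [c])]
    simp

theorem pvFoldB_skip (ws : List Char) (hws : ∀ c ∈ ws, PySem.Chars.isspace c = true) :
    ∀ (x : List Char) (segs : List String),
    (ws ++ x).foldl pvAltStep (segs, [], false) = x.foldl pvAltStep (segs, [], false) := by
  induction ws with
  | nil => intro x segs; simp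
  | cons c rest ih =>
    intro x segs
    have hc := hws c (by simp)
    rw [List.cons_append, List.foldl_cons]
    rw [show pvAltStep (segs, [], false) c = (segs, [], false) by simp [pvAltStep, hc]]
    exact ih (fun d hd => hws d (by simp [hd])) x segs

theorem pvFoldB_word (w : List Char) (hw : ∀ c ∈ w, PySem.Chars.isspace c = false) :
    ∀ (x : List Char) (segs : List String),
    (w ++ x).foldl pvAltStep (segs, [], true) = x.foldl pvAltStep (segs, [], true) := by
  induction w with
  | nil => intro x segs; simp
  | cons c rest ih =>
    intro x segs
    have hc := hw c (by simp)
    rw [List.cons_append, List.foldl_cons]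
    rw [show pvAltStep (segs, [], true) c = (segs, [], true) by simp [pvAltStep, hc]]
    exact ih (fun d hd => hw d (by simp [hd])) x segs

theorem pvFoldB (n : Nat) : ∀ (r : List Char) (segs : List String),
    r.length ≤ n → (r = [] ∨ ∃ c cs, r = c :: cs ∧ PySem.Chars.isspace c = true) →
    (r.foldl pvAltStep (segs, [], true)).1 = segs ++ (pvGaps r).map String.ofList := by
  induction n with
  | zero =>
    intro r segs hn hr
    have : r = [] := List.eq_nil_of_length_eq_zero (Nat.le_zero.mp hn)
    subst this
    simp [pvGaps_nil [] rfl]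
  | succ n ih =>
    intro r segs hn hhead
    by_cases hrest : r.dropWhile PySem.Chars.isspace = []
    · -- r is all whitespace: the fold keeps buffering and never flushes
      have hall : ∀ c ∈ r, PySem.Chars.isspace c = true := by
        rw [← List.dropWhile_eq_nil_iff]; exact hrest
      have := pvFoldB_ws r hall [] segs []
      simp only [List.append_nil] at this
      rw [this]
      simp [pvGaps_nil _ hrest]
    · obtain ⟨hdec, hws, hwall, hwne, hr'⟩ := pvDecomp r hrest
      set ws := r.takeWhile PySem.Chars.isspace with hwsdef
      set w := (r.dropWhile PySem.Chars.isspace).takeWhile pvNonWs with hwdef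
      set r' := (r.dropWhile PySem.Chars.isspace).dropWhile pvNonWs with hr'def
      obtain ⟨c, w', hw, hcns⟩ := hwne
      have hwsne : ws ≠ [] := by
        rcases hhead with rfl | ⟨d, x, rfl, hd⟩
        · simp at hrest
        · rw [hwsdef, List.takeWhile_cons]
          simp [hd]
      have hn' : r'.length ≤ n := by
        have : r.length = ws.length + (w.length + r'.length) := by
          simpa using congrArg List.length hdec
        have : 0 < w.length := by simp [hw]
        omega
      conv_lhs => rw [hdec, List.append_assoc, pvFoldB_ws ws hws]
      rw [hw, List.cons_append, List.foldl_cons]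
      rw [show pvAltStep (segs, [] ++ ws, true) c = (segs ++ [String.ofList ws], [], true) by
        simp [pvAltStep, hcns, List.isEmpty_iff, hwsne]]
      rw [pvFoldB_word w' (fun d hd => hwall d (by simp [hw, hd])) r' (segs ++ [String.ofList ws])]
      rw [ih r' (segs ++ [String.ofList ws]) hn' hr']
      rw [pvGaps_cons r hrest, ← hwsdef, ← hr'def]
      simp

theorem pvA_eval (text : String) :
    get_whitespace_between_words text = List.map String.ofList (pvGaps0 text.toList) := by
  unfold get_whitespace_between_words
  conv_lhs => rw [show text = String.ofList text.toList from String.ofList_toList.symm]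
  simp only [PySem.Str.split₀, PySem.Str.findFrom, String.toList_ofList]
  have h := pvFoldA text.toList text.toList.length text.toList 0 [] le_rfl (Nat.zero_le _) rfl
  simp only [Nat.cast_zero, List.nil_append] at h
  exact h

theorem pvB_eval (text : String) :
    get_whitespace_between_words_alt text = List.map String.ofList (pvGaps0 text.toList) := by
  unfold get_whitespace_between_words_alt
  by_cases hrest : text.toList.dropWhile PySem.Chars.isspace = []
  · have hall : ∀ c ∈ text.toList, PySem.Chars.isspace c = true := by
      rw [← List.dropWhile_eq_nil_iff]; exact hrest
    have h := pvFoldB_skip text.toList hall [] []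
    simp only [List.append_nil] at h
    rw [h]
    simp [pvGaps0_nil _ hrest]
  · obtain ⟨hdec, hws, hwall, hwne, hr'⟩ := pvDecomp text.toList hrest
    obtain ⟨c, w', hw, hcns⟩ := hwne
    conv_lhs => rw [hdec, List.append_assoc, pvFoldB_skip _ hws]
    rw [hw, List.cons_append, List.foldl_cons]
    rw [show pvAltStep ([], [], false) c = ([], [], true) by simp [pvAltStep, hcns]]
    rw [pvFoldB_word w' (fun d hd => hwall d (by simp [hw, hd]))]
    rw [pvFoldB _ _ [] le_rfl hr']
    rw [pvGaps0_cons _ hrest]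
    simp

-- ===== VERDICT (by name: the statement is the Claim_ definition above) =====
theorem get_whitespace_between_words_spec : Claim_equal_get_whitespace_between_words := by
  intro text _hdom
  show _ = _
  rw [pvA_eval, pvB_eval]
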